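-- pv_equiv track=rewrite | github.com/Davidhfw/QualityAssurance | apitest/api/framework/data_gen/server.py | combine_character
-- ===== SOURCE A (Python) =====
-- def combine_character(start, lst):
--     res = []
--     n = len(lst)
--     for k in range(start, n + 1):
--         temp = []
--         back_trace(n, k, [], 1, temp)
--         res.extend(temp)
--     return res
--
-- def back_trace(n, k, nums, index, res_all):
--     if len(nums) == k:
--         res_all.append(nums[:])
--         return
--
--     for i in range(index, n + 1):
--         nums.append(i)
--         back_trace(n, k, nums, i + 1, res_all)
--         nums.pop()
-- ===== SOURCE B (Python) =====
-- def combine_character(start, lst):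
--     n = len(lst)
--     # row[k] = the k-element increasing lists over the processed suffix {v..n}, lex order
--     row = [[[]]] + [[] for _ in range(n)]
--     for v in range(n, 0, -1):
--         row = [row[0]] + [[[v] + c for c in a] + b for a, b in zip(row, row[1:])]
--     res = []
--     for k in range(max(start, 0), n + 1):
--         res.extend(row[k])
--     return res
-- ===== Notes on version B (the rewrite author's own statement) =====
-- stated objective: alternative
-- what changed: Replaces the recursive back_trace (one backtracking search per size k) with a single bottom-up dynamic-programming pass that builds, for each suffix {v..n}, the table of k-combinations for all k at once, then concatenates the requested rows.
import Mathlib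
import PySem

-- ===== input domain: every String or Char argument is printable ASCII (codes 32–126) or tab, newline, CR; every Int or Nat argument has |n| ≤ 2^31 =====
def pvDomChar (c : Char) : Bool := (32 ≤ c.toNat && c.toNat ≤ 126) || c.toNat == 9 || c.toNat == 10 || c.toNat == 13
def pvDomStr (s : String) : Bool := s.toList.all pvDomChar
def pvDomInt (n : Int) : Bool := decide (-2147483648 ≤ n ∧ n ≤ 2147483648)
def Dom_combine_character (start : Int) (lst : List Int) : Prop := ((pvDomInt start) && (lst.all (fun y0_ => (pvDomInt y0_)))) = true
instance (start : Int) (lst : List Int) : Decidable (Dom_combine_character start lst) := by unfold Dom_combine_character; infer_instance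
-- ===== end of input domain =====

-- B replaces the recursive backtracking search (one search per size k) by a single bottom-up
-- DP over suffixes that builds all combination sizes at once; objective: alternative algorithm.

-- ===== PORT A =====
-- back_trace(n, k, nums, index, res_all): returns (as a value) the lists it appends to res_all
def backTrace (n k : Int) (nums : List Int) (index : Int) : List (List Int) :=
  if (nums.length : Int) = k then [nums]
  else
    (PySem.List.pyRange index (n + 1) 1).attach.foldl
      (fun acc i => acc ++ backTrace n k (nums ++ [i.1]) (i.1 + 1)) []
termination_by (n + 1 - index).toNat
decreasing_by
  have h := PySem.List.mem_pyRange_one.mp i.2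
  omega

def combine_character (start : Int) (lst : List Int) : List (List Int) :=
  let n : Int := lst.length
  (PySem.List.pyRange start (n + 1) 1).foldl
    (fun res k => res ++ backTrace n k [] 1) []

-- ===== PORT B =====
-- one pass of the loop body: row = [row[0]] + [[ [v]+c for c in a] + b for a,b in zip(row, row[1:])]
-- (row is never empty and every index is in range, so the defaulted lookup is exact)
def altStep (v : Int) (row : List (List (List Int))) : List (List (List Int)) :=
  PySem.List.pyGetD row 0 [] ::
    (row.zip row.tail).map (fun ab => ab.1.map (fun c => v :: c) ++ ab.2)

def combine_character_alt (start : Int) (lst : List Int) : List (List Int) :=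
  let n : Int := lst.length
  let row0 : List (List (List Int)) := [([] : List Int)] :: List.replicate n.toNat []
  let row := (PySem.List.pyRange n 0 (-1)).foldl (fun r v => altStep v r) row0
  (PySem.List.pyRange (max start 0) (n + 1) 1).foldl
    (fun res k => res ++ PySem.List.pyGetD row k []) []

-- ===== PRECONDITION & SPEC =====
def Spec_combine_character (start : Int) (lst : List Int) (out : List (List Int)) : Prop := out = combine_character_alt start lst
instance (start : Int) (lst : List Int) (out : List (List Int)) : Decidable (Spec_combine_character start lst out) := by unfold Spec_combine_character; infer_instance

-- ===== CLAIM (what is proved, stated in full; the proofs are below) =====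
def Claim_equal_combine_character : Prop := ∀ (start : Int) (lst : List Int), Dom_combine_character start lst → Spec_combine_character start lst (combine_character start lst)

-- ===== LEMMAS AND PROOFS =====

-- reference function: combs xs k = the k-element sublists of xs, in A's/B's common order
def combs : List Int → Nat → List (List Int)
  | _, 0 => [[]]
  | [], _ + 1 => []
  | x :: xs, k + 1 => (combs xs k).map (fun c => x :: c) ++ combs xs (k + 1)

def combsI (xs : List Int) (j : Int) : List (List Int) :=
  if 0 ≤ j then combs xs j.toNat else []

lemma combsI_zero (xs : List Int) : combsI xs 0 = [[]] := by
  simp [combsI, combs]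

lemma combsI_nil (j : Int) (hj : j ≠ 0) : combsI [] j = [] := by
  unfold combsI
  split_ifs with h
  · have : ∃ t, j.toNat = t + 1 := ⟨j.toNat - 1, by omega⟩
    obtain ⟨t, ht⟩ := this
    rw [ht]; rfl
  · rfl

lemma combsI_cons (x : Int) (xs : List Int) (j : Int) (hj : j ≠ 0) :
    combsI (x :: xs) j = (combsI xs (j - 1)).map (fun c => x :: c) ++ combsI xs j := by
  unfold combsI
  split_ifs with h h1 h2
  · have : ∃ t, j.toNat = t + 1 := ⟨j.toNat - 1, by omega⟩
    obtain ⟨t, ht⟩ := this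
    have h2 : (j - 1).toNat = t := by omega
    rw [ht, h2]; rfl
  · omega
  · omega
  · rfl

lemma backTrace_eq (n k : Int) (nums : List Int) (index : Int) :
    backTrace n k nums index =
      if (nums.length : Int) = k then [nums]
      else (PySem.List.pyRange index (n + 1) 1).flatMap
        (fun i => backTrace n k (nums ++ [i]) (i + 1)) := by
  rw [backTrace]
  split_ifs with h
  · rfl
  · rw [List.foldl_attach (l := PySem.List.pyRange index (n + 1) 1)
      (f := fun acc i => acc ++ backTrace n k (nums ++ [i]) (i + 1))]
    exact PySem.List.foldl_append_eq_flatMap _ _ _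

lemma backTrace_spec (n k : Int) : ∀ (m : Nat) (nums : List Int) (index : Int),
    (n + 1 - index).toNat ≤ m →
    backTrace n k nums index =
      (combsI (PySem.List.pyRange index (n + 1) 1) (k - nums.length)).map (fun c => nums ++ c) := by
  intro m
  induction m with
  | zero =>
    intro nums index hm
    have hnil : PySem.List.pyRange index (n + 1) 1 = [] :=
      PySem.List.pyRange_one_eq_nil (by omega)
    rw [backTrace_eq, hnil]
    split_ifs with h
    · have : k - (nums.length : Int) = 0 := by omega
      rw [this, combsI_zero]; simp
    · rw [combsI_nil _ (by omega)]; simp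
  | succ m ih =>
    intro nums index hm
    rw [backTrace_eq]
    split_ifs with h
    · have : k - (nums.length : Int) = 0 := by omega
      rw [this, combsI_zero]; simp
    · by_cases hidx : index ≤ n
      · rw [PySem.List.pyRange_one_cons (by omega)]
        rw [List.flatMap_cons]
        have h1 : backTrace n k (nums ++ [index]) (index + 1) =
            (combsI (PySem.List.pyRange (index + 1) (n + 1) 1)
              (k - (nums.length : Int) - 1)).map (fun c => (nums ++ [index]) ++ c) := by
          rw [ih (nums ++ [index]) (index + 1) (by omega)]
          congr 1
          · congr 1; simp; omega
        have h2 : (PySem.List.pyRange (index + 1) (n + 1) 1).flatMap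
              (fun i => backTrace n k (nums ++ [i]) (i + 1)) =
            (combsI (PySem.List.pyRange (index + 1) (n + 1) 1) (k - nums.length)).map
              (fun c => nums ++ c) := by
          have := backTrace_eq n k nums (index + 1)
          rw [if_neg h] at this
          rw [← this, ih nums (index + 1) (by omega)]
        rw [h1, h2, combsI_cons _ _ _ (by omega)]
        simp
      · have hnil : PySem.List.pyRange index (n + 1) 1 = [] :=
          PySem.List.pyRange_one_eq_nil (by omega)
        rw [hnil, combsI_nil _ (by omega)]
        simp

-- A as a flatMap of combsI
lemma combine_character_closed (start : Int) (lst : List Int) :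
    combine_character start lst =
      (PySem.List.pyRange start ((lst.length : Int) + 1) 1).flatMap
        (fun k => combsI (PySem.List.pyRange 1 ((lst.length : Int) + 1) 1) k) := by
  unfold combine_character
  rw [PySem.List.foldl_append_eq_flatMap]
  rw [List.nil_append]
  apply List.flatMap_congr
  intro k hk
  rw [backTrace_spec (lst.length : Int) k ((lst.length : Int) + 1 - 1).toNat [] 1 (by omega)]
  simp

-- zip of a range-map with its own tail
lemma zip_map_range {α : Type} (f : Nat → α) (m : Nat) :
    (((List.range (m + 1)).map f).zip (((List.range (m + 1)).map f).tail)) =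
      (List.range m).map (fun k => (f k, f (k + 1))) := by
  apply List.ext_getElem
  · simp
  · intro i h1 h2
    simp [List.getElem_zip, List.getElem_tail]

-- one DP step: altStep turns the row of a suffix s into the row of v :: s
lemma altStep_row (v : Int) (s : List Int) (m : Nat) :
    altStep v ((List.range (m + 1)).map (fun k => combs s k)) =
      (List.range (m + 1)).map (fun k => combs (v :: s) k) := by
  unfold altStep
  rw [zip_map_range]
  rw [List.range_succ_eq_map]
  simp [PySem.List.pyGetD, PySem.List.pyGet?, PySem.List.pyIdx?, List.map_map, combs]

-- the whole countdown fold
lemma fold_rows (n : Int) : ∀ (a : Nat), (a : Int) ≤ n →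
    (PySem.List.pyRange (a : Int) 0 (-1)).foldl (fun r v => altStep v r)
        ((List.range (n.toNat + 1)).map (fun k => combs (PySem.List.pyRange ((a : Int) + 1) (n + 1) 1) k)) =
      (List.range (n.toNat + 1)).map (fun k => combs (PySem.List.pyRange 1 (n + 1) 1) k) := by
  intro a
  induction a with
  | zero =>
    intro _
    rw [PySem.List.pyRange_neg_one_eq_nil (by omega)]
    norm_num
  | succ a ih =>
    intro ha
    have h1 : ((a + 1 : Nat) : Int) = (a : Int) + 1 := by push_cast; ring
    rw [h1]
    rw [PySem.List.pyRange_neg_one_cons (by omega)]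
    rw [List.foldl_cons, altStep_row]
    rw [show ((a : Int) + 1 - 1) = (a : Int) by ring]
    rw [show ((a : Int) + 1) :: PySem.List.pyRange ((a : Int) + 1 + 1) (n + 1) 1 =
        PySem.List.pyRange ((a : Int) + 1) (n + 1) 1 from
      (PySem.List.pyRange_one_cons (by push_cast at ha; omega)).symm]
    exact ih (by push_cast at ha; omega)

lemma row0_eq (n : Int) :
    ([([] : List Int)] :: List.replicate n.toNat ([] : List (List Int))) =
      (List.range (n.toNat + 1)).map (fun k => combs (PySem.List.pyRange (n + 1) (n + 1) 1) k) := by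
  rw [PySem.List.pyRange_one_eq_nil (by omega), List.range_succ_eq_map, List.map_cons,
    List.map_map]
  rw [show ((fun k => combs ([] : List Int) k) ∘ Nat.succ) = (fun _ => ([] : List (List Int)))
    from funext (fun k => rfl)]
  simp [combs, List.length_range]

lemma pyGetD_row (n : Int) (row : List (List (List Int)))
    (hrow : row = (List.range (n.toNat + 1)).map (fun k => combs (PySem.List.pyRange 1 (n + 1) 1) k))
    (k : Int) (h0 : 0 ≤ k) (h1 : k ≤ n) :
    PySem.List.pyGetD row k [] = combsI (PySem.List.pyRange 1 (n + 1) 1) k := by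
  subst hrow
  rw [show k = ((k.toNat : Nat) : Int) by omega]
  rw [PySem.List.pyGetD_natCast]
  rw [List.getD_eq_getElem?_getD]
  rw [List.getElem?_map]
  rw [List.getElem?_range (by omega)]
  simp [combsI, h0]

-- ===== VERDICT (by name: the statement is the Claim_ definition above) =====
theorem combine_character_spec : Claim_equal_combine_character := by
  intro start lst _
  unfold Spec_combine_character
  rw [combine_character_closed]
  unfold combine_character_alt
  have hn : (0 : Int) ≤ (lst.length : Int) := by positivity
  set n : Int := (lst.length : Int) with hndef
  rw [PySem.List.foldl_append_eq_flatMap, List.nil_append]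
  have hrow : (PySem.List.pyRange n 0 (-1)).foldl (fun r v => altStep v r)
      ([([] : List Int)] :: List.replicate n.toNat []) =
      (List.range (n.toNat + 1)).map (fun k => combs (PySem.List.pyRange 1 (n + 1) 1) k) := by
    rw [row0_eq n]
    have := fold_rows n n.toNat (by omega)
    rw [show ((n.toNat : Int)) = n by omega] at this
    exact this
  rw [hrow]
  -- now both sides are flatMaps; replace the pyGetD lookups by combsI
  have hRHS : (PySem.List.pyRange (max start 0) (n + 1) 1).flatMap
      (fun k => PySem.List.pyGetD ((List.range (n.toNat + 1)).map
        (fun k => combs (PySem.List.pyRange 1 (n + 1) 1) k)) k []) =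
      (PySem.List.pyRange (max start 0) (n + 1) 1).flatMap
        (fun k => combsI (PySem.List.pyRange 1 (n + 1) 1) k) := by
    apply List.flatMap_congr
    intro k hk
    have hk' := PySem.List.mem_pyRange_one.mp hk
    exact pyGetD_row n _ rfl k (by omega) (by omega)
  rw [hRHS]
  by_cases hs : start ≤ n + 1
  · rw [PySem.List.pyRange_one_append start (max start 0) (n + 1) (by omega) (by omega)]
    rw [List.flatMap_append]
    have hneg : (PySem.List.pyRange start (max start 0) 1).flatMap
        (fun k => combsI (PySem.List.pyRange 1 (n + 1) 1) k) = [] := by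
      rw [List.flatMap_eq_nil_iff]
      intro k hk
      have hk' := PySem.List.mem_pyRange_one.mp hk
      unfold combsI
      rw [if_neg (by omega)]
    rw [hneg, List.nil_append]
  · rw [PySem.List.pyRange_one_eq_nil (a := start) (by omega)]
    rw [PySem.List.pyRange_one_eq_nil (a := max start 0) (by omega)]
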